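-- pv_equiv track=rewrite | github.com/Heather1999/Bioinformatic-projects | ORFs.py | find_protein_coding_regions
-- ===== SOURCE A (Python) =====
-- def find_protein_coding_regions(sequences, start_sequence="M", stop_sequence="*"):
--     start_positions = []
--     coding_regions = []
--     for i, seq in enumerate(sequences):
--         if start_sequence in seq:
--             start_positions.append(i)
--         elif stop_sequence in seq and start_positions:
--             coding_regions.append((start_positions[0], i+1))
--             start_positions = []
--     return coding_regions
-- ===== SOURCE B (Python) =====
-- def find_protein_coding_regions(sequences, start_sequence="M", stop_sequence="*"):
--     # classify each sequence once, then pair the two sorted index lists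
--     starts = [i for i, seq in enumerate(sequences) if start_sequence in seq]
--     stops = [i for i, seq in enumerate(sequences)
--              if start_sequence not in seq and stop_sequence in seq]
--     regions = []
--     j = 0
--     last = -1
--     for s in starts:
--         if s <= last:
--             continue
--         while j < len(stops) and stops[j] < s:
--             j += 1
--         if j == len(stops):
--             break
--         t = stops[j]
--         regions.append((s, t + 1))
--         last = t
--     return regions
-- ===== Notes on version B (the rewrite author's own statement) =====
-- stated objective: alternative
-- what changed: Replaces A's single stateful scan (accumulating start positions and clearing them at each stop) with two classification passes that build sorted start/stop index lists, paired afterwards by a two-pointer walk.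
import Mathlib
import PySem

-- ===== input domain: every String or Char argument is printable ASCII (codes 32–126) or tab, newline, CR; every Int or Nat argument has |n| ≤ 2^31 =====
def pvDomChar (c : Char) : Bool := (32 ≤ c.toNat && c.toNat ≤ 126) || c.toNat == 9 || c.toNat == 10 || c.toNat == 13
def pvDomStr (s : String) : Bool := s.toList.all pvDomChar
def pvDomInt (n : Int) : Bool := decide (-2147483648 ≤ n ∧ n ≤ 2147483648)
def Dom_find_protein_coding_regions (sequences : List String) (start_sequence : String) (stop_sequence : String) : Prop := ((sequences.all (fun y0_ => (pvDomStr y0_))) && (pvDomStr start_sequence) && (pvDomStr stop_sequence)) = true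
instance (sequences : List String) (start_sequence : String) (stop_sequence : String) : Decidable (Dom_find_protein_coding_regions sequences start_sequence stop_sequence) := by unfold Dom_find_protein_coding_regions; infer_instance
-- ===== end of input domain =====

-- B classifies each sequence once into start/stop index lists and pairs them with a
-- two-pointer walk, instead of A's single stateful scan accumulating start positions (alternative decomposition).


-- ===== PORT A =====
def find_protein_coding_regions (sequences : List String) (start_sequence : String) (stop_sequence : String) : List (Int × Int) :=
  ((PySem.List.enumerate sequences 0).foldl
    (fun (st : List Int × List (Int × Int)) (p : Int × String) =>
      if PySem.Str.isIn start_sequence p.2 then (st.1 ++ [p.1], st.2)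
      else if PySem.Str.isIn stop_sequence p.2 && !st.1.isEmpty then
        ([], st.2 ++ [(st.1.headD 0, p.1 + 1)])   -- start_positions[0] under the nonempty guard
      else st)
    ([], [])).2

-- ===== PORT B =====
-- the for-loop over `starts` of Source B; the j pointer into `stops` is the suffix argument
def pvPairLoop (starts : List Int) (stops : List Int) (last : Int) : List (Int × Int) :=
  match starts with
  | [] => []
  | s :: rest =>
    if s ≤ last then pvPairLoop rest stops last
    else
      match stops.dropWhile (fun t => t < s) with   -- the `while stops[j] < s: j += 1` advance
      | [] => []
      | t :: tail => (s, t + 1) :: pvPairLoop rest (t :: tail) t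

def find_protein_coding_regions_alt (sequences : List String) (start_sequence : String) (stop_sequence : String) : List (Int × Int) :=
  let enums := PySem.List.enumerate sequences 0
  let starts := (enums.filter (fun p => PySem.Str.isIn start_sequence p.2)).map (·.1)
  let stops := (enums.filter (fun p => !PySem.Str.isIn start_sequence p.2 && PySem.Str.isIn stop_sequence p.2)).map (·.1)
  pvPairLoop starts stops (-1)

-- ===== PRECONDITION & SPEC =====
def Spec_find_protein_coding_regions (sequences : List String) (start_sequence : String) (stop_sequence : String) (out : List (Int × Int)) : Prop := out = find_protein_coding_regions_alt sequences start_sequence stop_sequence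
instance (sequences : List String) (start_sequence : String) (stop_sequence : String) (out : List (Int × Int)) : Decidable (Spec_find_protein_coding_regions sequences start_sequence stop_sequence out) := by unfold Spec_find_protein_coding_regions; infer_instance

-- ===== CLAIM (what is proved, stated in full; the proofs are below) =====
def Claim_equal_find_protein_coding_regions : Prop := ∀ (sequences : List String) (start_sequence : String) (stop_sequence : String), Dom_find_protein_coding_regions sequences start_sequence stop_sequence → Spec_find_protein_coding_regions sequences start_sequence stop_sequence (find_protein_coding_regions sequences start_sequence stop_sequence)

-- ===== LEMMAS AND PROOFS =====

-- A's step function and loop, named for the proofs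
def pvAf (start_sequence stop_sequence : String) (st : List Int × List (Int × Int)) (p : Int × String) : List Int × List (Int × Int) :=
  if PySem.Str.isIn start_sequence p.2 then (st.1 ++ [p.1], st.2)
  else if PySem.Str.isIn stop_sequence p.2 && !st.1.isEmpty then
    ([], st.2 ++ [(st.1.headD 0, p.1 + 1)])
  else st

def pvArec (start_sequence stop_sequence : String) : List (Int × String) → List Int → List (Int × Int)
  | [], _ => []
  | (i, seq) :: rest, sp =>
    if PySem.Str.isIn start_sequence seq then pvArec start_sequence stop_sequence rest (sp ++ [i])
    else if PySem.Str.isIn stop_sequence seq && !sp.isEmpty then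
      (sp.headD 0, i + 1) :: pvArec start_sequence stop_sequence rest []
    else pvArec start_sequence stop_sequence rest sp

lemma pvFoldA (start_sequence stop_sequence : String) :
    ∀ (l : List (Int × String)) (sp : List Int) (acc : List (Int × Int)),
    (l.foldl (pvAf start_sequence stop_sequence) (sp, acc)).2
      = acc ++ pvArec start_sequence stop_sequence l sp := by
  intro l
  induction l with
  | nil => intro sp acc; simp [pvArec]
  | cons p rest ih =>
    intro sp acc
    obtain ⟨i, seq⟩ := p
    rw [List.foldl_cons]
    by_cases h1 : PySem.Str.isIn start_sequence seq
    · have hf : pvAf start_sequence stop_sequence (sp, acc) (i, seq) = (sp ++ [i], acc) := by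
        simp only [pvAf, if_pos h1]
      rw [hf, ih]
      simp only [pvArec]
      rw [if_pos h1]
    · by_cases h2 : (PySem.Str.isIn stop_sequence seq && !sp.isEmpty) = true
      · have hf : pvAf start_sequence stop_sequence (sp, acc) (i, seq)
            = ([], acc ++ [(sp.headD 0, i + 1)]) := by
          simp only [pvAf, if_neg h1, if_pos h2]
        rw [hf, ih]
        simp only [pvArec]
        rw [if_neg h1, if_pos h2, List.append_assoc, List.singleton_append]
      · have hf : pvAf start_sequence stop_sequence (sp, acc) (i, seq) = (sp, acc) := by
          simp only [pvAf, if_neg h1, if_neg h2]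
        rw [hf, ih]
        simp only [pvArec]
        rw [if_neg h1, if_neg h2]

lemma pvMemFilterMapGe (P : Int × String → Bool) :
    ∀ (l : List String) (n : Int) (x : Int),
    x ∈ ((PySem.List.enumerate l n).filter P).map (·.1) → n ≤ x := by
  intro l n x hx
  simp only [List.mem_map, List.mem_filter] at hx
  obtain ⟨p, ⟨hmem, _⟩, hfst⟩ := hx
  rw [PySem.List.mem_enumerate_iff] at hmem
  obtain ⟨k, hk, rfl⟩ := hmem
  subst hfst
  simp

lemma pvDropStop (i : Int) :
    ∀ (S T : List Int) (last : Int), (∀ s ∈ S, i < s) →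
    pvPairLoop S (i :: T) last = pvPairLoop S T last := by
  intro S
  induction S with
  | nil => intro T last _; simp [pvPairLoop]
  | cons s rest ih =>
    intro T last hall
    have his : i < s := hall s (by simp)
    by_cases hle : s ≤ last
    · simp only [pvPairLoop, if_pos hle]
      exact ih T last (fun x hx => hall x (by simp [hx]))
    · simp only [pvPairLoop, if_neg hle, List.dropWhile_cons, decide_eq_true_eq, if_pos his]

lemma pvSkipStart (h i : Int) :
    ∀ (S T : List Int) (last : Int), last < h → h < i → (∀ t ∈ T, i < t) →
    pvPairLoop (h :: i :: S) T last = pvPairLoop (h :: S) T last := by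
  intro S T last hlast hhi hall
  have hnle : ¬ h ≤ last := by omega
  cases T with
  | nil => simp [pvPairLoop, if_neg hnle]
  | cons t T' =>
    have hit : i < t := hall t (by simp)
    have hth : ¬ (t < h) := by omega
    have hskip : i ≤ t := by omega
    simp only [pvPairLoop, if_neg hnle, List.dropWhile_cons, decide_eq_true_eq, if_neg hth,
      if_pos hskip]

lemma pvMain (start_sequence stop_sequence : String) :
    ∀ (l : List String) (n last : Int) (sp : List Int),
    last < n → (∀ h ∈ sp.head?, last < h ∧ h < n) →
    pvArec start_sequence stop_sequence (PySem.List.enumerate l n) sp =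
    pvPairLoop
      (sp.head?.toList ++ ((PySem.List.enumerate l n).filter (fun p => PySem.Str.isIn start_sequence p.2)).map (·.1))
      (((PySem.List.enumerate l n).filter (fun p => !PySem.Str.isIn start_sequence p.2 && PySem.Str.isIn stop_sequence p.2)).map (·.1))
      last := by
  intro l
  induction l with
  | nil =>
    intro n last sp hln hsp
    cases sp with
    | nil => simp [PySem.List.enumerate_nil, pvArec, pvPairLoop]
    | cons h t =>
      have := (hsp h (by simp)).1
      have hnle : ¬ h ≤ last := by omega
      simp [PySem.List.enumerate_nil, pvArec, pvPairLoop, hnle]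
  | cons x xs ih =>
    intro n last sp hln hsp
    rw [PySem.List.enumerate_cons]
    by_cases h1 : PySem.Str.isIn start_sequence x
    · -- start in x : index n joins the starts
      have hstartf : (List.filter (fun p => PySem.Str.isIn start_sequence p.2) ((n, x) :: PySem.List.enumerate xs (n+1)))
          = (n, x) :: List.filter (fun p => PySem.Str.isIn start_sequence p.2) (PySem.List.enumerate xs (n+1)) := by
        simp only [List.filter_cons, h1, if_pos]
      have hstopf : (List.filter (fun p => !PySem.Str.isIn start_sequence p.2 && PySem.Str.isIn stop_sequence p.2) ((n, x) :: PySem.List.enumerate xs (n+1)))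
          = List.filter (fun p => !PySem.Str.isIn start_sequence p.2 && PySem.Str.isIn stop_sequence p.2) (PySem.List.enumerate xs (n+1)) := by
        simp only [List.filter_cons, h1, Bool.not_true, Bool.false_and, Bool.false_eq_true,
          if_false]
      have hstops : ∀ t ∈ ((PySem.List.enumerate xs (n+1)).filter
          (fun p => !PySem.Str.isIn start_sequence p.2 && PySem.Str.isIn stop_sequence p.2)).map (·.1), n < t := by
        intro t ht; have := pvMemFilterMapGe _ xs (n+1) t ht; omega
      simp only [pvArec]
      rw [if_pos h1, hstartf, hstopf, List.map_cons]
      cases sp with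
      | nil =>
        rw [show ([] : List Int) ++ [n] = [n] from rfl,
          ih (n+1) last [n] (by omega) (by intro h hh; simp at hh; omega)]
        simp
      | cons h0 t0 =>
        have hh0 := hsp h0 (by simp)
        rw [show (h0 :: t0) ++ [n] = h0 :: (t0 ++ [n]) from rfl,
          ih (n+1) last (h0 :: (t0 ++ [n])) (by omega)
            (by intro h hh; simp at hh; subst hh; exact ⟨hh0.1, by omega⟩)]
        simp only [List.head?_cons, Option.toList_some, List.singleton_append]
        exact (pvSkipStart h0 n _ _ last hh0.1 hh0.2 hstops).symm
    · have h1' : PySem.Str.isIn start_sequence x = false := by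
        simpa only [Bool.not_eq_true] using h1
      have hstartf : (List.filter (fun p => PySem.Str.isIn start_sequence p.2) ((n, x) :: PySem.List.enumerate xs (n+1)))
          = List.filter (fun p => PySem.Str.isIn start_sequence p.2) (PySem.List.enumerate xs (n+1)) := by
        simp only [List.filter_cons, h1', Bool.false_eq_true, if_false]
      have hstarts : ∀ s ∈ ((PySem.List.enumerate xs (n+1)).filter
          (fun p => PySem.Str.isIn start_sequence p.2)).map (·.1), n < s := by
        intro s hs; have := pvMemFilterMapGe _ xs (n+1) s hs; omega
      by_cases h2 : PySem.Str.isIn stop_sequence x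
      · -- stop (and not start) in x : index n joins the stops
        have hstopf : (List.filter (fun p => !PySem.Str.isIn start_sequence p.2 && PySem.Str.isIn stop_sequence p.2) ((n, x) :: PySem.List.enumerate xs (n+1)))
            = (n, x) :: List.filter (fun p => !PySem.Str.isIn start_sequence p.2 && PySem.Str.isIn stop_sequence p.2) (PySem.List.enumerate xs (n+1)) := by
          simp only [List.filter_cons, h1', h2, Bool.not_false, Bool.true_and, if_pos]
        cases sp with
        | nil =>
          simp only [pvArec]
          rw [if_neg h1, if_neg (by simp : ¬ ((PySem.Str.isIn stop_sequence x && !(List.nil (α := Int)).isEmpty) = true)),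
            hstartf, hstopf, List.map_cons, ih (n+1) last [] (by omega) (by simp)]
          simp only [List.head?_nil, Option.toList_none, List.nil_append]
          exact (pvDropStop n _ _ last hstarts).symm
        | cons h0 t0 =>
          have hh0 := hsp h0 (by simp)
          simp only [pvArec]
          rw [if_neg h1,
            if_pos (by simp only [h2, List.isEmpty_cons, Bool.not_false, Bool.and_self] : (PySem.Str.isIn stop_sequence x && !(h0 :: t0).isEmpty) = true),
            hstartf, hstopf, List.map_cons, ih (n+1) n [] (by omega) (by simp)]
          simp only [List.head?_cons, Option.toList_some, List.head?_nil, Option.toList_none,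
            List.nil_append, List.headD_cons, List.singleton_append]
          have hnle : ¬ h0 ≤ last := by omega
          have hnlt : ¬ (n < h0) := by omega
          rw [show pvPairLoop (h0 :: ((PySem.List.enumerate xs (n+1)).filter (fun p => PySem.Str.isIn start_sequence p.2)).map (·.1))
              (n :: ((PySem.List.enumerate xs (n+1)).filter (fun p => !PySem.Str.isIn start_sequence p.2 && PySem.Str.isIn stop_sequence p.2)).map (·.1)) last
              = (h0, n + 1) :: pvPairLoop (((PySem.List.enumerate xs (n+1)).filter (fun p => PySem.Str.isIn start_sequence p.2)).map (·.1))
              (n :: ((PySem.List.enumerate xs (n+1)).filter (fun p => !PySem.Str.isIn start_sequence p.2 && PySem.Str.isIn stop_sequence p.2)).map (·.1)) n from by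
            simp only [pvPairLoop, if_neg hnle, List.dropWhile_cons, decide_eq_true_eq,
              if_neg hnlt]]
          rw [pvDropStop n _ _ n hstarts]
      · -- neither : index n is dropped from both lists
        have h2' : PySem.Str.isIn stop_sequence x = false := by
          simpa only [Bool.not_eq_true] using h2
        have hstopf : (List.filter (fun p => !PySem.Str.isIn start_sequence p.2 && PySem.Str.isIn stop_sequence p.2) ((n, x) :: PySem.List.enumerate xs (n+1)))
            = List.filter (fun p => !PySem.Str.isIn start_sequence p.2 && PySem.Str.isIn stop_sequence p.2) (PySem.List.enumerate xs (n+1)) := by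
          simp only [List.filter_cons, h2', Bool.and_false, Bool.false_eq_true, if_false]
        simp only [pvArec]
        rw [if_neg h1, if_neg (by simp only [h2', Bool.false_and, Bool.false_eq_true, not_false_eq_true] : ¬ ((PySem.Str.isIn stop_sequence x && !sp.isEmpty) = true)),
          hstartf, hstopf,
          ih (n+1) last sp (by omega) (fun h hh => ⟨(hsp h hh).1, by have := (hsp h hh).2; omega⟩)]

-- ===== VERDICT (by name: the statement is the Claim_ definition above) =====
theorem find_protein_coding_regions_spec : Claim_equal_find_protein_coding_regions := by
  intro sequences start_sequence stop_sequence _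
  unfold Spec_find_protein_coding_regions
  have hA : find_protein_coding_regions sequences start_sequence stop_sequence
      = ((PySem.List.enumerate sequences 0).foldl (pvAf start_sequence stop_sequence) ([], [])).2 := rfl
  rw [hA, pvFoldA]
  unfold find_protein_coding_regions_alt
  simpa using pvMain start_sequence stop_sequence sequences 0 (-1) [] (by omega) (by simp)
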